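-- pv_equiv track=rewrite | github.com/thezealousfool/Misc-Work | JU/Networks Lab/Stop_Wait_ARQ.py | printlongdiv
-- ===== SOURCE A (Python) =====
-- def bitstring(x):
--     return bin(x)[2:]
--
-- def printlongdiv(lhs, rhs):
--     rem = lhs
--     div = rhs
--
--     count = 1
--     while (div | rem) > 2*div:
--         div <<= 1
--         count += 1
--
--     quot = 0
--     while count > 0:
--         quot <<= 1
--         count -= 1
--         if (rem ^ div) < rem:
--             quot |= 1
--             rem ^= div
--         div >>= 1
--
--     return bitstring(rem)
-- ===== SOURCE B (Python) =====
-- def printlongdiv(lhs, rhs):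
--     # GF(2) remainder by linearity: scan the dividend LSB-first, maintaining
--     # power = x^i mod rhs, and XOR the residues of the set bits together.
--     R = rhs.bit_length()
--     top = 1 << (R - 1)
--     rem = 0
--     power = 1
--     x = lhs
--     while x:
--         if power & top:
--             power ^= rhs
--         if x & 1:
--             rem ^= power
--         x >>= 1
--         power <<= 1
--     return bin(rem)[2:]
-- ===== Notes on version B (the rewrite author's own statement) =====
-- stated objective: alternative
-- what changed: B replaces A's high-to-low long division (align the divisor, then XOR it down past the remainder's leading bit while tracking a quotient) by a linearity-based LSB-first scan of the dividend that maintains power = x^i mod rhs in a fixed-width register and XORs the residues of the set bits into the result; the divisor is never shifted.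
-- outside the precondition, e.g. on printlongdiv(-3, 5): A returns 'b1000', B does not finish within the time limit; on printlongdiv(0, 0): A returns '0', B raises ValueError
import Mathlib
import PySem

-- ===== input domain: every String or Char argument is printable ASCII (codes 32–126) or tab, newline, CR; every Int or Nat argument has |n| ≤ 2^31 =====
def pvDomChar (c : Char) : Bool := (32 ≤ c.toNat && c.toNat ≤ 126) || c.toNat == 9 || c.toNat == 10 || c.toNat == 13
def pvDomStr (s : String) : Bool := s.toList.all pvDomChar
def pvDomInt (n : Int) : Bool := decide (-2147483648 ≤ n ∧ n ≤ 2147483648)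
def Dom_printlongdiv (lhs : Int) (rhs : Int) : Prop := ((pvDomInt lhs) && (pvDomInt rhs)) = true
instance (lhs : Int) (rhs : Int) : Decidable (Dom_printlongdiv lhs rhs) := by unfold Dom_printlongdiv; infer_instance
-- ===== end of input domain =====

-- B replaces A's high-to-low long division (shift the divisor up, then XOR it down past the
-- remainder's leading bit) by a linearity-based LSB-first scan of the dividend that maintains
-- power = x^i mod rhs in a fixed-width register; the divisor is never shifted (objective: alternative).

-- ===== PORT A =====
def pvBitstring (x : Int) : String :=
  PySem.Str.slice (PySem.Int.pyBin x) (some 2) none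

-- 'while (div | rem) > 2*div: div <<= 1; count += 1' — fuel only makes the loop total;
-- on Pre_ inputs bitLength rem + 1 steps always suffice (rem is fixed during this loop).
def pvAlignLoop (rem : Int) : Nat → Int → Int → Int × Int
  | 0, div, count => (div, count)
  | fuel+1, div, count =>
    if PySem.Int.bor div rem > 2 * div then
      pvAlignLoop rem fuel (div <<< (1:Nat)) (count + 1)
    else (div, count)

-- 'while count > 0: …' — count decreases by exactly 1 each pass, so count.toNat is exact.
def pvDivLoop : Nat → Int → Int → Int → Int × Int
  | 0, quot, rem, _div => (quot, rem)
  | n+1, quot, rem, div =>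
    let quot := quot <<< (1:Nat)
    if PySem.Int.bxor rem div < rem then
      pvDivLoop n (PySem.Int.bor quot 1) (PySem.Int.bxor rem div) (div >>> (1:Nat))
    else
      pvDivLoop n quot rem (div >>> (1:Nat))

def printlongdiv (lhs : Int) (rhs : Int) : String :=
  let dc := pvAlignLoop lhs (PySem.Int.bitLength lhs + 1) rhs 1
  let qr := pvDivLoop dc.2.toNat 0 lhs dc.1
  pvBitstring qr.2

-- ===== PORT B =====
-- 'while x: if power & top: power ^= rhs; if x & 1: rem ^= power; x >>= 1; power <<= 1'
-- structural recursion on x (x halves each pass; exact for the x ≥ 0 inputs Pre_ admits,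
-- where Python's loop terminates).
def pvAltLoop (g top : Nat) (x rem power : Nat) : Nat :=
  if _h : x = 0 then rem
  else
    let power := if power &&& top ≠ 0 then power ^^^ g else power
    let rem := if x &&& 1 ≠ 0 then rem ^^^ power else rem
    pvAltLoop g top (x >>> 1) rem (power <<< 1)
  termination_by x
  decreasing_by simpa [Nat.shiftRight_one] using Nat.div_lt_self (Nat.pos_of_ne_zero _h) one_lt_two

-- .toNat is exact on Pre_ (lhs ≥ 0, 0 < rhs); Python's '1 << (R - 1)' raises for rhs = 0 and
-- its loop never ends for negative lhs — both outside Pre_.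
def printlongdiv_alt (lhs : Int) (rhs : Int) : String :=
  let R := PySem.Int.bitLength rhs
  let top : Nat := 1 <<< (R - 1)
  let rem := pvAltLoop rhs.toNat top lhs.toNat 0 1
  PySem.Str.slice (PySem.Int.pyBin (rem : Int)) (some 2) none

-- ===== PRECONDITION & SPEC =====
-- Pre_ excludes negative lhs, where A slices bin() of a negative remainder into a
-- stray-'b' non-bitstring (and B's Python loops forever), and rhs ≤ 0, where A loops
-- forever for every lhs except (lhs=0, rhs≤0), where A returns '0' while B raises ValueError.
def Pre_printlongdiv (lhs : Int) (rhs : Int) : Prop := 0 ≤ lhs ∧ 0 < rhs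
instance (lhs : Int) (rhs : Int) : Decidable (Pre_printlongdiv lhs rhs) := by
  unfold Pre_printlongdiv; infer_instance

def pvWitness_printlongdiv : Int × Int := (13, 5)

def Spec_printlongdiv (lhs : Int) (rhs : Int) (out : String) : Prop := out = printlongdiv_alt lhs rhs
instance (lhs : Int) (rhs : Int) (out : String) : Decidable (Spec_printlongdiv lhs rhs out) := by unfold Spec_printlongdiv; infer_instance

-- ===== CLAIM (what is proved, stated in full; the proofs are below) =====
def Claim_equal_printlongdiv : Prop := ∀ (lhs : Int) (rhs : Int), Dom_printlongdiv lhs rhs → Pre_printlongdiv lhs rhs → Spec_printlongdiv lhs rhs (printlongdiv lhs rhs)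

-- ===== LEMMAS AND PROOFS =====

-- ---- generic bit lemmas ----
theorem pvTopBit {m t : Nat} (h1 : 2^t ≤ m) (h2 : m < 2^(t+1)) : m.testBit t = true :=
  Nat.testBit_of_two_pow_le_and_two_pow_add_one_gt h1 h2

theorem pvHighBitsFalse {d t : Nat} (h2 : d < 2^(t+1)) : ∀ j, t < j → d.testBit j = false := by
  intro j hj
  exact Nat.testBit_lt_two_pow (lt_of_lt_of_le h2 (Nat.pow_le_pow_right (by norm_num) hj))

theorem pvXorLtIff {d t : Nat} (h1 : 2^t ≤ d) (h2 : d < 2^(t+1)) (m : Nat) :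
    (m ^^^ d < m) ↔ m.testBit t = true := by
  have hd : d.testBit t = true := pvTopBit h1 h2
  have hdj := pvHighBitsFalse h2
  constructor
  · intro hlt
    by_contra hb
    have hmb : m.testBit t = false := by simpa using hb
    have : m < m ^^^ d :=
      Nat.lt_of_testBit t (by simp [hmb]) (by simp [Nat.testBit_xor, hmb, hd])
        (fun j hj => by simp [Nat.testBit_xor, hdj j hj])
    omega
  · intro hb
    exact Nat.lt_of_testBit t (by simp [Nat.testBit_xor, hb, hd]) hb
      (fun j hj => by simp [Nat.testBit_xor, hdj j hj])

theorem pvOrGtIff {d t : Nat} (h1 : 2^t ≤ d) (h2 : d < 2^(t+1)) (m : Nat) :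
    (2*d < d ||| m) ↔ 2^(t+1) ≤ m := by
  have hpow : (2:Nat)^(t+1) = 2*2^t := by ring
  constructor
  · intro h
    by_contra hb
    push_neg at hb
    have hor : d ||| m < 2^(t+1) := Nat.or_lt_two_pow h2 hb
    omega
  · intro hm
    have hm0 : m ≠ 0 := by
      have := Nat.two_pow_pos (t+1); omega
    have hub : 2^(PySem.Int.bitLength (m:Int) - 1) ≤ m := by
      simpa using PySem.Int.two_pow_bitLength_le (m:Int) (by exact_mod_cast hm0)
    have hub2 : m < 2^(PySem.Int.bitLength (m:Int)) := by
      simpa using PySem.Int.lt_two_pow_bitLength (m:Int)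
    set u := PySem.Int.bitLength (m:Int) - 1 with hu
    have hBL : PySem.Int.bitLength (m:Int) = u + 1 := by
      have : PySem.Int.bitLength (m:Int) ≠ 0 := by
        intro h0; rw [h0] at hub2; omega
      omega
    rw [hBL] at hub2
    have hut : t + 1 ≤ u := by
      by_contra hc
      push_neg at hc
      have : (2:Nat)^(u+1) ≤ 2^(t+1) := Nat.pow_le_pow_right (by norm_num) (by omega)
      omega
    by_cases hcase : t + 2 ≤ u
    · have h4 : (2:Nat)^(t+2) ≤ 2^u := Nat.pow_le_pow_right (by norm_num) hcase
      have h5 : m ≤ d ||| m := Nat.right_le_or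
      have h6 : (2:Nat)^(t+2) = 2*2^(t+1) := by ring
      omega
    · have hu' : u = t + 1 := by omega
      have hmt : m.testBit (t+1) = true := pvTopBit (hu' ▸ hub) (hu' ▸ hub2)
      have key : 2^(t+1) + d ≤ d ||| m := by
        have he : (2:Nat)^(t+1) + d = 2^(t+1) ||| d := by
          simpa using Nat.two_pow_add_eq_or_of_lt (i := t+1) h2 1
        rw [he]
        apply Nat.le_of_testBit
        intro i hi
        rw [Nat.testBit_or] at hi
        rw [Nat.testBit_or]
        rcases Bool.or_eq_true_iff.mp hi with hp | hp
        · have : i = t + 1 := by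
            by_contra hne
            rw [Nat.testBit_two_pow_of_ne (Ne.symm hne)] at hp
            exact Bool.noConfusion hp
          subst this
          simp [hmt]
        · simp [hp]
      omega

theorem pvShlBounds (r : Nat) (hr : 0 < r) (j : Nat) :
    2^(PySem.Int.bitLength (r:Int) - 1 + j) ≤ r <<< j ∧
      r <<< j < 2^(PySem.Int.bitLength (r:Int) + j) := by
  have h1 : 2^(PySem.Int.bitLength (r:Int) - 1) ≤ r := by
    simpa using PySem.Int.two_pow_bitLength_le (r:Int) (by exact_mod_cast hr.ne')
  have h2 : r < 2^(PySem.Int.bitLength (r:Int)) := by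
    simpa using PySem.Int.lt_two_pow_bitLength (r:Int)
  rw [Nat.shiftLeft_eq]
  constructor
  · rw [pow_add]; exact Nat.mul_le_mul_right _ h1
  · rw [pow_add]; exact Nat.mul_lt_mul_of_pos_right h2 (Nat.two_pow_pos j)

theorem pvBLpos (r : Nat) (hr : 0 < r) : 1 ≤ PySem.Int.bitLength (r:Int) := by
  have h2 : r < 2^(PySem.Int.bitLength (r:Int)) := by
    simpa using PySem.Int.lt_two_pow_bitLength (r:Int)
  by_contra h
  push_neg at h
  have h0 : PySem.Int.bitLength (r:Int) = 0 := by omega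
  rw [h0] at h2
  simp at h2
  omega

theorem pvRTop (r : Nat) (hr : 0 < r) : r.testBit (PySem.Int.bitLength (r:Int) - 1) = true := by
  have hR1 := pvBLpos r hr
  have hrlo : 2^(PySem.Int.bitLength (r:Int) - 1) ≤ r := by
    simpa using PySem.Int.two_pow_bitLength_le (r:Int) (by exact_mod_cast hr.ne')
  have hrhi : r < 2^(PySem.Int.bitLength (r:Int)) := by
    simpa using PySem.Int.lt_two_pow_bitLength (r:Int)
  have he : PySem.Int.bitLength (r:Int) - 1 + 1 = PySem.Int.bitLength (r:Int) := by omega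
  exact pvTopBit hrlo (by rw [he]; exact hrhi)

theorem pvShlSucc (r j : Nat) :
    ((r <<< j : Nat):Int) <<< (1:Nat) = ((r <<< (j+1) : Nat):Int) := by
  rw [← Int.natCast_shiftLeft]
  congr 1
  simp [Nat.shiftLeft_eq, pow_succ]
  ring

theorem pvShrOne (r j : Nat) :
    ((r <<< (j+1) : Nat):Int) >>> (1:Nat) = ((r <<< j : Nat):Int) := by
  rw [← Int.natCast_shiftRight]
  congr 1
  simp [Nat.shiftLeft_eq, pow_succ, Nat.shiftRight_succ, Nat.shiftRight_zero]
  have : r * (2^j*2) = (r*2^j)*2 := by ring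
  rw [this]
  exact Nat.mul_div_cancel _ (by norm_num)

-- ---- A's alignment loop: div ends at rhs <<< (L ∸ R), count at (L ∸ R) + 1 ----
theorem pvAlignCond (l r : Nat) (hr : 0 < r) (j : Nat) :
    (PySem.Int.bor ((r <<< j : Nat):Int) (l:Int) > 2 * ((r <<< j : Nat):Int))
      ↔ 2^(PySem.Int.bitLength (r:Int) + j) ≤ l := by
  have hb := pvShlBounds r hr j
  have hR1 := pvBLpos r hr
  have ht : PySem.Int.bitLength (r:Int) - 1 + j + 1 = PySem.Int.bitLength (r:Int) + j := by omega
  rw [PySem.Int.bor_natCast,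
    show (2 * ((r <<< j : Nat):Int)) = ((2*(r <<< j) : Nat) : Int) by push_cast; ring]
  rw [gt_iff_lt, Nat.cast_lt]
  rw [← ht]
  exact pvOrGtIff hb.1 (by rw [ht]; exact hb.2) l

theorem pvAlign_spec (l r : Nat) (hr : 0 < r) :
    ∀ (fuel j : Nat),
      PySem.Int.bitLength (l:Int) ≤ PySem.Int.bitLength (r:Int) + j + fuel →
      pvAlignLoop (l:Int) fuel ((r <<< j : Nat) : Int) ((j:Int)+1)
        = (((r <<< (j + (PySem.Int.bitLength (l:Int) - (PySem.Int.bitLength (r:Int) + j))) : Nat) : Int),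
           ((j + (PySem.Int.bitLength (l:Int) - (PySem.Int.bitLength (r:Int) + j)) : Nat) : Int) + 1) := by
  intro fuel
  induction fuel with
  | zero =>
    intro j hj
    have hs : PySem.Int.bitLength (l:Int) - (PySem.Int.bitLength (r:Int) + j) = 0 := by omega
    simp [pvAlignLoop, hs]
  | succ fuel ih =>
    intro j hj
    have hlL : l < 2^(PySem.Int.bitLength (l:Int)) := by
      simpa using PySem.Int.lt_two_pow_bitLength (l:Int)
    simp only [pvAlignLoop]
    by_cases hc : 2^(PySem.Int.bitLength (r:Int) + j) ≤ l
    · rw [if_pos ((pvAlignCond l r hr j).mpr hc)]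
      have hLgt : PySem.Int.bitLength (r:Int) + j < PySem.Int.bitLength (l:Int) := by
        by_contra hcc
        push_neg at hcc
        have : (2:Nat)^(PySem.Int.bitLength (l:Int)) ≤ 2^(PySem.Int.bitLength (r:Int) + j) :=
          Nat.pow_le_pow_right (by norm_num) hcc
        omega
      rw [pvShlSucc,
        show ((j:Int)+1)+1 = ((j+1 : Nat):Int)+1 by push_cast; ring,
        ih (j+1) (by omega),
        show j + 1 + (PySem.Int.bitLength (l:Int) - (PySem.Int.bitLength (r:Int) + (j+1)))
           = j + (PySem.Int.bitLength (l:Int) - (PySem.Int.bitLength (r:Int) + j)) by omega]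
    · rw [if_neg (fun hcc => hc ((pvAlignCond l r hr j).mp hcc))]
      have hLle : PySem.Int.bitLength (l:Int) ≤ PySem.Int.bitLength (r:Int) + j := by
        by_cases hl0 : l = 0
        · subst hl0
          simp [PySem.Int.bitLength_zero]
        · have h1l : 2^(PySem.Int.bitLength (l:Int) - 1) ≤ l := by
            simpa using PySem.Int.two_pow_bitLength_le (l:Int) (by exact_mod_cast hl0)
          by_contra hcc
          push_neg at hcc
          have : (2:Nat)^(PySem.Int.bitLength (r:Int) + j) ≤ 2^(PySem.Int.bitLength (l:Int) - 1) :=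
            Nat.pow_le_pow_right (by norm_num) (by omega)
          omega
      have hs : PySem.Int.bitLength (l:Int) - (PySem.Int.bitLength (r:Int) + j) = 0 := by omega
      simp [hs]

theorem pvDivCondA (r : Nat) (hr : 0 < r) (n m : Nat) :
    (PySem.Int.bxor (m:Int) ((r <<< n : Nat):Int) < (m:Int))
      ↔ m.testBit (PySem.Int.bitLength (r:Int) - 1 + n) = true := by
  have hb := pvShlBounds r hr n
  have hR1 := pvBLpos r hr
  have ht : PySem.Int.bitLength (r:Int) - 1 + n + 1 = PySem.Int.bitLength (r:Int) + n := by omega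
  rw [PySem.Int.bxor_natCast, Nat.cast_lt]
  exact pvXorLtIff hb.1 (by rw [ht]; exact hb.2) m

-- ---- GF(2) multiples of the divisor ----
def pvGf2mul (q g : Nat) : Nat :=
  if h : q = 0 then 0
  else (if q % 2 = 1 then g else 0) ^^^ (pvGf2mul (q / 2) g) <<< 1
  termination_by q
  decreasing_by exact Nat.div_lt_self (Nat.pos_of_ne_zero h) one_lt_two

def pvIsMul (g M : Nat) : Prop := ∃ q, M = pvGf2mul q g

theorem pvGf2mul_zero (g : Nat) : pvGf2mul 0 g = 0 := by
  rw [pvGf2mul]; simp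

theorem pvGf2mul_one (g : Nat) : pvGf2mul 1 g = g := by
  rw [pvGf2mul]; simp [pvGf2mul_zero]

theorem pvIsMul_zero (g : Nat) : pvIsMul g 0 := ⟨0, (pvGf2mul_zero g).symm⟩

theorem pvIsMul_self (g : Nat) : pvIsMul g g := ⟨1, (pvGf2mul_one g).symm⟩

theorem pvGf2mul_xor_left (g : Nat) : ∀ a b, pvGf2mul a g ^^^ pvGf2mul b g = pvGf2mul (a ^^^ b) g := by
  intro a
  induction a using Nat.strong_induction_on with
  | _ a ih =>
    intro b
    by_cases ha : a = 0
    · subst ha; simp [pvGf2mul_zero]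
    by_cases hb : b = 0
    · subst hb; simp [pvGf2mul_zero]
    by_cases hab : a ^^^ b = 0
    · have : a = b := by simpa using Nat.xor_eq_zero_iff.mp hab
      subst this
      simp [hab, pvGf2mul_zero]
    rw [pvGf2mul.eq_def (q := a), pvGf2mul.eq_def (q := b), pvGf2mul.eq_def (q := a ^^^ b)]
    simp only [ha, hb, hab, if_false, dite_false]
    rw [Nat.xor_div_two, ← ih (a / 2) (Nat.div_lt_self (Nat.pos_of_ne_zero ha) one_lt_two) (b / 2)]
    rw [Nat.shiftLeft_xor_distrib]
    have hpar : (a ^^^ b) % 2 = (a % 2 + b % 2) % 2 := by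
      have h1 := Nat.testBit_xor a b 0
      simp only [Nat.testBit_zero] at h1
      rcases Nat.mod_two_eq_zero_or_one a with h | h <;>
        rcases Nat.mod_two_eq_zero_or_one b with h' | h' <;>
          simp [h, h'] at h1 ⊢ <;> omega
    rcases Nat.mod_two_eq_zero_or_one a with h | h <;>
      rcases Nat.mod_two_eq_zero_or_one b with h' | h' <;>
        simp [h, h', hpar] <;>
          first
            | ac_rfl
            | · rw [show g ^^^ pvGf2mul (a / 2) g <<< 1 ^^^ (g ^^^ pvGf2mul (b / 2) g <<< 1)
                    = (g ^^^ g) ^^^ (pvGf2mul (a / 2) g <<< 1 ^^^ pvGf2mul (b / 2) g <<< 1) from by ac_rfl,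
                  Nat.xor_self, Nat.zero_xor]

theorem pvIsMul_xor {g a b : Nat} (ha : pvIsMul g a) (hb : pvIsMul g b) : pvIsMul g (a ^^^ b) := by
  obtain ⟨qa, rfl⟩ := ha
  obtain ⟨qb, rfl⟩ := hb
  exact ⟨qa ^^^ qb, pvGf2mul_xor_left g qa qb⟩

theorem pvIsMul_shift1 {g M : Nat} (h : pvIsMul g M) : pvIsMul g (M <<< 1) := by
  obtain ⟨q, rfl⟩ := h
  refine ⟨2 * q, ?_⟩
  by_cases hq : q = 0
  · subst hq; simp [pvGf2mul_zero]
  rw [pvGf2mul.eq_def (q := 2 * q)]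
  have h2 : ¬ (2 * q = 0) := by omega
  simp only [h2, dite_false]
  have : 2 * q % 2 = 0 := by omega
  simp [this, Nat.mul_div_cancel_left q (by norm_num : 0 < 2)]

-- pvGf2mul is linear in its second argument and commutes with shifting it
theorem pvGf2mul_base_shift (g : Nat) : ∀ q, pvGf2mul q (g <<< 1) = (pvGf2mul q g) <<< 1 := by
  intro q
  induction q using Nat.strong_induction_on with
  | _ q ih =>
    by_cases hq : q = 0
    · subst hq; simp [pvGf2mul_zero]
    rw [pvGf2mul.eq_def (q := q) (g := g <<< 1), pvGf2mul.eq_def (q := q) (g := g)]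
    simp only [hq, dite_false]
    rw [ih (q / 2) (Nat.div_lt_self (Nat.pos_of_ne_zero hq) one_lt_two)]
    rw [Nat.shiftLeft_xor_distrib]
    congr 1
    split <;> simp

theorem pvGf2mul_base_xor (b g : Nat) : ∀ q, pvGf2mul q (b ^^^ g) = pvGf2mul q b ^^^ pvGf2mul q g := by
  intro q
  induction q using Nat.strong_induction_on with
  | _ q ih =>
    by_cases hq : q = 0
    · subst hq; simp [pvGf2mul_zero]
    rw [pvGf2mul.eq_def (q := q) (g := b ^^^ g), pvGf2mul.eq_def (q := q) (g := b),
      pvGf2mul.eq_def (q := q) (g := g)]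
    simp only [hq, dite_false]
    rw [ih (q / 2) (Nat.div_lt_self (Nat.pos_of_ne_zero hq) one_lt_two)]
    rw [Nat.shiftLeft_xor_distrib]
    split <;> (try simp) <;> ac_rfl

theorem pvGf2mul_base_one : ∀ q, pvGf2mul q 1 = q := by
  intro q
  induction q using Nat.strong_induction_on with
  | _ q ih =>
    by_cases hq : q = 0
    · subst hq; simp [pvGf2mul_zero]
    rw [pvGf2mul.eq_def (q := q)]
    simp only [hq, dite_false]
    rw [ih (q / 2) (Nat.div_lt_self (Nat.pos_of_ne_zero hq) one_lt_two)]
    apply Nat.eq_of_testBit_eq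
    intro i
    cases i with
    | zero =>
      rcases Nat.mod_two_eq_zero_or_one q with h | h <;>
        simp [Nat.testBit_xor, Nat.testBit_zero, Nat.testBit_shiftLeft, h, Nat.shiftLeft_eq] <;>
        omega
    | succ i =>
      rcases Nat.mod_two_eq_zero_or_one q with h | h <;>
        simp [Nat.testBit_xor, Nat.testBit_add_one, Nat.testBit_shiftLeft, h,
          Nat.xor_div_two, Nat.shiftLeft_eq, Nat.mul_comm, Nat.mul_div_cancel_left]

-- a nonzero bit-string with no bit below 2^k XORed in cannot fall below a multiple's floor
theorem pvXorGe {a b k : Nat} (ha : 2^k ≤ a) (hb : b < 2^k) : 2^k ≤ a ^^^ b := by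
  obtain ⟨p, hp, hbit⟩ := Nat.exists_ge_and_testBit_of_ge_two_pow ha
  -- take instead the HIGHEST set bit of a
  obtain ⟨t, htk, htbit, htmax⟩ :
      ∃ t, k ≤ t ∧ a.testBit t = true ∧ ∀ j, t < j → a.testBit j = false := by
    have ha0 : a ≠ 0 := by have := Nat.two_pow_pos k; omega
    have haBL : 2^(PySem.Int.bitLength (a:Int) - 1) ≤ a := by
      simpa using PySem.Int.two_pow_bitLength_le (a:Int) (by exact_mod_cast ha0)
    have haBL2 : a < 2^(PySem.Int.bitLength (a:Int)) := by
      simpa using PySem.Int.lt_two_pow_bitLength (a:Int)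
    have hBL1 : 1 ≤ PySem.Int.bitLength (a:Int) := pvBLpos a (Nat.pos_of_ne_zero ha0)
    refine ⟨PySem.Int.bitLength (a:Int) - 1, ?_, ?_, ?_⟩
    · by_contra hc
      push_neg at hc
      have : (2:Nat)^(PySem.Int.bitLength (a:Int)) ≤ 2^k :=
        Nat.pow_le_pow_right (by norm_num) (by omega)
      omega
    · exact pvTopBit haBL (by
        have : PySem.Int.bitLength (a:Int) - 1 + 1 = PySem.Int.bitLength (a:Int) := by omega
        rw [this]; exact haBL2)
    · intro j hj
      exact Nat.testBit_lt_two_pow (lt_of_lt_of_le haBL2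
        (Nat.pow_le_pow_right (by norm_num) (by omega)))
  have hbbit : b.testBit t = false :=
    Nat.testBit_lt_two_pow (lt_of_lt_of_le hb (Nat.pow_le_pow_right (by norm_num) htk))
  have : (a ^^^ b).testBit t = true := by simp [Nat.testBit_xor, htbit, hbbit]
  calc 2^k ≤ 2^t := Nat.pow_le_pow_right (by norm_num) htk
    _ ≤ a ^^^ b := Nat.ge_two_pow_of_testBit this

-- a nonzero multiple of g has at least g's leading bit
theorem pvGf2mul_ge {g t : Nat} (h1 : 2^t ≤ g) (h2 : g < 2^(t+1)) :
    ∀ q, q ≠ 0 → 2^t ≤ pvGf2mul q g := by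
  intro q
  induction q using Nat.strong_induction_on with
  | _ q ih =>
    intro hq
    rw [pvGf2mul.eq_def (q := q)]
    simp only [hq, dite_false]
    by_cases hq2 : q / 2 = 0
    · have hq1 : q % 2 = 1 := by omega
      simp [hq1, hq2, pvGf2mul_zero]
      omega
    · have hge : 2^t ≤ pvGf2mul (q / 2) g :=
        ih (q / 2) (Nat.div_lt_self (Nat.pos_of_ne_zero hq) one_lt_two) hq2
      have hshift : 2^(t+1) ≤ (pvGf2mul (q / 2) g) <<< 1 := by
        rw [Nat.shiftLeft_eq, pow_succ]
        calc (2:Nat)^t * 2 ≤ pvGf2mul (q / 2) g * 2 := Nat.mul_le_mul_right _ hge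
          _ = _ := by ring_nf
      have hlow : (if q % 2 = 1 then g else 0) < 2^(t+1) := by
        split <;> [exact h2; exact Nat.two_pow_pos _]
      have : 2^(t+1) ≤ (if q % 2 = 1 then g else 0) ^^^ (pvGf2mul (q / 2) g) <<< 1 := by
        rw [Nat.xor_comm]
        exact pvXorGe hshift hlow
      calc (2:Nat)^t ≤ 2^(t+1) := Nat.pow_le_pow_right (by norm_num) (by omega)
        _ ≤ _ := this

theorem pvDivLoop_succ (n : Nat) (quot rem div : Int) :
    pvDivLoop (n+1) quot rem div =
      if PySem.Int.bxor rem div < rem then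
        pvDivLoop n (PySem.Int.bor (quot <<< (1:Nat)) 1) (PySem.Int.bxor rem div) (div >>> (1:Nat))
      else pvDivLoop n (quot <<< (1:Nat)) rem (div >>> (1:Nat)) := rfl

-- ---- characterisation of A's division loop ----
theorem pvDivLoop_spec (r : Nat) (hr : 0 < r) :
    ∀ (n : Nat) (m : Nat) (quot : Int),
      m < 2^(PySem.Int.bitLength (r:Int) + n) →
      ∃ M, pvIsMul r M ∧
        (pvDivLoop (n+1) quot (m:Int) ((r <<< n : Nat):Int)).2 = ((m ^^^ M : Nat) : Int) ∧
        m ^^^ M < 2^(PySem.Int.bitLength (r:Int) - 1) := by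
  have hR1 := pvBLpos r hr
  have hrlo : 2^(PySem.Int.bitLength (r:Int) - 1) ≤ r := by
    simpa using PySem.Int.two_pow_bitLength_le (r:Int) (by exact_mod_cast hr.ne')
  have hrhi : r < 2^(PySem.Int.bitLength (r:Int)) := by
    simpa using PySem.Int.lt_two_pow_bitLength (r:Int)
  intro n
  induction n with
  | zero =>
    intro m quot hm
    rw [pvDivLoop_succ]
    by_cases hc : m.testBit (PySem.Int.bitLength (r:Int) - 1 + 0) = true
    · rw [if_pos ((pvDivCondA r hr 0 m).mpr hc)]
      refine ⟨r, pvIsMul_self r, ?_, ?_⟩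
      · simp [pvDivLoop, PySem.Int.bxor_natCast, Nat.shiftLeft_zero]
      · apply Nat.lt_pow_two_of_testBit
        intro j hj
        rcases Nat.lt_or_ge j (PySem.Int.bitLength (r:Int)) with hj2 | hj2
        · have hje : j = PySem.Int.bitLength (r:Int) - 1 := by omega
          subst hje
          have hrt : r.testBit (PySem.Int.bitLength (r:Int) - 1) = true := pvRTop r hr
          simp only [Nat.testBit_xor]
          simp only [Nat.add_zero] at hc
          simp [hc, hrt]
        · have h1 : m.testBit j = false := Nat.testBit_lt_two_pow
            (lt_of_lt_of_le (by simpa using hm) (Nat.pow_le_pow_right (by norm_num) hj2))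
          have h2 : r.testBit j = false := Nat.testBit_lt_two_pow
            (lt_of_lt_of_le hrhi (Nat.pow_le_pow_right (by norm_num) hj2))
          simp [Nat.testBit_xor, h1, h2]
    · rw [if_neg (fun h => hc ((pvDivCondA r hr 0 m).mp h))]
      refine ⟨0, pvIsMul_zero r, by simp [pvDivLoop], ?_⟩
      simp only [Nat.xor_zero]
      apply Nat.lt_pow_two_of_testBit
      intro j hj
      rcases Nat.lt_or_ge j (PySem.Int.bitLength (r:Int)) with hj2 | hj2
      · have hje : j = PySem.Int.bitLength (r:Int) - 1 := by omega
        subst hje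
        simpa using hc
      · exact Nat.testBit_lt_two_pow
          (lt_of_lt_of_le (by simpa using hm) (Nat.pow_le_pow_right (by norm_num) hj2))
  | succ n ih =>
    intro m quot hm
    rw [pvDivLoop_succ]
    have htop : (r <<< (n+1)).testBit (PySem.Int.bitLength (r:Int) + n) = true := by
      have hb := pvShlBounds r hr (n+1)
      have he : PySem.Int.bitLength (r:Int) - 1 + (n+1) = PySem.Int.bitLength (r:Int) + n := by omega
      have he2 : PySem.Int.bitLength (r:Int) + (n+1) = (PySem.Int.bitLength (r:Int) + n) + 1 := by omega
      exact pvTopBit (he ▸ hb.1) (by rw [← he2]; exact hb.2)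
    by_cases hc : m.testBit (PySem.Int.bitLength (r:Int) - 1 + (n+1)) = true
    · rw [if_pos ((pvDivCondA r hr (n+1) m).mpr hc)]
      rw [PySem.Int.bxor_natCast, pvShrOne]
      have hm' : m ^^^ r <<< (n+1) < 2^(PySem.Int.bitLength (r:Int) + n) := by
        apply Nat.lt_pow_two_of_testBit
        intro j hj
        rcases Nat.lt_or_ge j (PySem.Int.bitLength (r:Int) + (n+1)) with hj2 | hj2
        · have hje : j = PySem.Int.bitLength (r:Int) + n := by omega
          subst hje
          have hcm : m.testBit (PySem.Int.bitLength (r:Int) + n) = true := by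
            have he : PySem.Int.bitLength (r:Int) - 1 + (n+1) = PySem.Int.bitLength (r:Int) + n := by omega
            rwa [he] at hc
          simp [Nat.testBit_xor, hcm, htop]
        · have h1 : m.testBit j = false := Nat.testBit_lt_two_pow
            (lt_of_lt_of_le hm (Nat.pow_le_pow_right (by norm_num) hj2))
          have h2 : (r <<< (n+1)).testBit j = false := Nat.testBit_lt_two_pow
            (lt_of_lt_of_le (pvShlBounds r hr (n+1)).2 (Nat.pow_le_pow_right (by norm_num) hj2))
          simp [Nat.testBit_xor, h1, h2]
      obtain ⟨M, hM, hval, hbound⟩ := ih (m ^^^ r <<< (n+1)) (PySem.Int.bor (quot <<< (1:Nat)) 1) hm'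
      refine ⟨r <<< (n+1) ^^^ M, ?_, ?_, ?_⟩
      · refine pvIsMul_xor ?_ hM
        -- r <<< (n+1) is a multiple: shift the trivial multiple r up n+1 times
        have : ∀ k, pvIsMul r (r <<< k) := by
          intro k
          induction k with
          | zero => simpa using pvIsMul_self r
          | succ k ihk =>
            have : r <<< (k+1) = (r <<< k) <<< 1 := by
              simp [Nat.shiftLeft_eq, pow_succ]; ring
            rw [this]
            exact pvIsMul_shift1 ihk
        exact this (n+1)
      · rw [hval]; congr 1; ac_rfl
      · have : m ^^^ (r <<< (n+1) ^^^ M) = (m ^^^ r <<< (n+1)) ^^^ M := by ac_rfl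
        rw [this]; exact hbound
    · rw [if_neg (fun h => hc ((pvDivCondA r hr (n+1) m).mp h))]
      rw [pvShrOne]
      have hm' : m < 2^(PySem.Int.bitLength (r:Int) + n) := by
        apply Nat.lt_pow_two_of_testBit
        intro j hj
        rcases Nat.lt_or_ge j (PySem.Int.bitLength (r:Int) + (n+1)) with hj2 | hj2
        · have hje : j = PySem.Int.bitLength (r:Int) + n := by omega
          subst hje
          have he : PySem.Int.bitLength (r:Int) - 1 + (n+1) = PySem.Int.bitLength (r:Int) + n := by omega
          rw [← he]
          simpa using hc
        · exact Nat.testBit_lt_two_pow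
            (lt_of_lt_of_le hm (Nat.pow_le_pow_right (by norm_num) hj2))
      exact ih m (quot <<< (1:Nat)) hm'

-- a multiple of a multiple is a multiple
theorem pvIsMul_gf2mul {r C : Nat} (hC : pvIsMul r C) (q : Nat) : pvIsMul r (pvGf2mul q C) := by
  induction q using Nat.strong_induction_on with
  | _ q ih =>
    by_cases hq : q = 0
    · subst hq; rw [pvGf2mul_zero]; exact pvIsMul_zero r
    rw [pvGf2mul.eq_def (q := q)]
    simp only [hq, dite_false]
    refine pvIsMul_xor ?_ (pvIsMul_shift1 (ih (q / 2) (Nat.div_lt_self (Nat.pos_of_ne_zero hq) one_lt_two)))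
    split
    · exact hC
    · exact pvIsMul_zero r

-- ---- characterisation of B's loop ----
theorem pvAltLoop_spec (r : Nat) (hr : 0 < r) :
    ∀ (x rem power : Nat),
      power < 2^(PySem.Int.bitLength (r:Int)) →
      rem < 2^(PySem.Int.bitLength (r:Int) - 1) →
      ∃ M, pvIsMul r M ∧
        pvAltLoop r (2^(PySem.Int.bitLength (r:Int) - 1)) x rem power
          = rem ^^^ pvGf2mul x power ^^^ M ∧
        pvAltLoop r (2^(PySem.Int.bitLength (r:Int) - 1)) x rem power
          < 2^(PySem.Int.bitLength (r:Int) - 1) := by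
  have hR1 := pvBLpos r hr
  have hrlo : 2^(PySem.Int.bitLength (r:Int) - 1) ≤ r := by
    simpa using PySem.Int.two_pow_bitLength_le (r:Int) (by exact_mod_cast hr.ne')
  have hrhi : r < 2^(PySem.Int.bitLength (r:Int)) := by
    simpa using PySem.Int.lt_two_pow_bitLength (r:Int)
  have hrt : r.testBit (PySem.Int.bitLength (r:Int) - 1) = true := pvRTop r hr
  intro x
  induction x using Nat.strong_induction_on with
  | _ x ih =>
    intro rem power hpow hrem
    by_cases hx : x = 0
    · subst hx
      rw [pvAltLoop]
      simp only [dite_true]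
      exact ⟨0, pvIsMul_zero r, by simp [pvGf2mul_zero], hrem⟩
    rw [pvAltLoop.eq_def]
    simp only [hx, dite_false]
    -- the reduce step
    have hpne : (2:Nat)^(PySem.Int.bitLength (r:Int) - 1) ≠ 0 := (Nat.two_pow_pos _).ne'
    have hcond : (power &&& 2^(PySem.Int.bitLength (r:Int) - 1) ≠ 0)
        ↔ power.testBit (PySem.Int.bitLength (r:Int) - 1) = true := by
      rw [Nat.and_two_pow]
      cases hpb : power.testBit (PySem.Int.bitLength (r:Int) - 1) <;> simp [hpb, hpne]
    set power' := if power &&& 2^(PySem.Int.bitLength (r:Int) - 1) ≠ 0 then power ^^^ r else power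
      with hpow'def
    have hpow' : power' < 2^(PySem.Int.bitLength (r:Int) - 1) := by
      rw [hpow'def]
      split
      · next h =>
        have ht := hcond.mp h
        apply Nat.lt_pow_two_of_testBit
        intro j hj
        rcases Nat.lt_or_ge j (PySem.Int.bitLength (r:Int)) with hj2 | hj2
        · have hje : j = PySem.Int.bitLength (r:Int) - 1 := by omega
          subst hje
          simp [Nat.testBit_xor, ht, hrt]
        · have h1 : power.testBit j = false := Nat.testBit_lt_two_pow
            (lt_of_lt_of_le hpow (Nat.pow_le_pow_right (by norm_num) hj2))
          have h2 : r.testBit j = false := Nat.testBit_lt_two_pow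
            (lt_of_lt_of_le hrhi (Nat.pow_le_pow_right (by norm_num) hj2))
          simp [Nat.testBit_xor, h1, h2]
      · next h =>
        have ht : power.testBit (PySem.Int.bitLength (r:Int) - 1) = false := by
          cases hpb : power.testBit (PySem.Int.bitLength (r:Int) - 1)
          · rfl
          · exact absurd (hcond.mpr hpb) h
        apply Nat.lt_pow_two_of_testBit
        intro j hj
        rcases Nat.lt_or_ge j (PySem.Int.bitLength (r:Int)) with hj2 | hj2
        · have hje : j = PySem.Int.bitLength (r:Int) - 1 := by omega
          subst hje
          exact ht
        · exact Nat.testBit_lt_two_pow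
            (lt_of_lt_of_le hpow (Nat.pow_le_pow_right (by norm_num) hj2))
    -- power' differs from power by a multiple of r
    have hpowmul : ∃ C, pvIsMul r C ∧ power' = power ^^^ C := by
      rw [hpow'def]
      split
      · exact ⟨r, pvIsMul_self r, rfl⟩
      · exact ⟨0, pvIsMul_zero r, by simp⟩
    obtain ⟨C, hC, hpowC⟩ := hpowmul
    set rem' := if x &&& 1 ≠ 0 then rem ^^^ power' else rem with hrem'def
    have hrem' : rem' < 2^(PySem.Int.bitLength (r:Int) - 1) := by
      rw [hrem'def]
      split
      · exact Nat.xor_lt_two_pow hrem hpow'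
      · exact hrem
    have hpows : power' <<< 1 < 2^(PySem.Int.bitLength (r:Int)) := by
      rw [Nat.shiftLeft_eq]
      have : (2:Nat)^(PySem.Int.bitLength (r:Int)) = 2^(PySem.Int.bitLength (r:Int) - 1) * 2 := by
        rw [← pow_succ]
        congr 1
        omega
      omega
    obtain ⟨M', hM', hval', hbound'⟩ :=
      ih (x >>> 1) (by rw [Nat.shiftRight_one]; exact Nat.div_lt_self (Nat.pos_of_ne_zero hx) one_lt_two)
        rem' (power' <<< 1) hpows hrem'
    refine ⟨(if x &&& 1 ≠ 0 then C else 0) ^^^ (pvGf2mul (x / 2) C) <<< 1 ^^^ M', ?_, ?_, hbound'⟩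
    · refine pvIsMul_xor (pvIsMul_xor ?_ ?_) hM'
      · split
        · exact hC
        · exact pvIsMul_zero r
      · exact pvIsMul_shift1 (pvIsMul_gf2mul hC (x / 2))
    · rw [hval']
      rw [pvGf2mul.eq_def (q := x)]
      simp only [hx, dite_false]
      rw [pvGf2mul_base_shift, hpowC, pvGf2mul_base_xor, Nat.shiftLeft_xor_distrib]
      have hxand : (x &&& 1 ≠ 0) ↔ x % 2 = 1 := by
        rw [Nat.and_one_is_mod]; omega
      rw [Nat.shiftRight_one]
      rw [hrem'def]
      by_cases hodd : x % 2 = 1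
      · rw [if_pos (hxand.mpr hodd), if_pos hodd, if_pos (hxand.mpr hodd), hpowC]
        ac_rfl
      · rw [if_neg (fun h => hodd (hxand.mp h)), if_neg hodd, if_neg (fun h => hodd (hxand.mp h))]
        simp only [Nat.zero_xor]
        ac_rfl

theorem pv_main (l r : Nat) (hr : 0 < r) :
    printlongdiv (l:Int) (r:Int) = printlongdiv_alt (l:Int) (r:Int) := by
  have hR1 := pvBLpos r hr
  have hrlo : 2^(PySem.Int.bitLength (r:Int) - 1) ≤ r := by
    simpa using PySem.Int.two_pow_bitLength_le (r:Int) (by exact_mod_cast hr.ne')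
  have hrhi : r < 2^(PySem.Int.bitLength (r:Int)) := by
    simpa using PySem.Int.lt_two_pow_bitLength (r:Int)
  have hlhi : l < 2^(PySem.Int.bitLength (l:Int)) := by
    simpa using PySem.Int.lt_two_pow_bitLength (l:Int)
  have halign := pvAlign_spec l r hr (PySem.Int.bitLength (l:Int) + 1) 0 (by omega)
  rw [Nat.shiftLeft_zero] at halign
  norm_num at halign
  have hcnt : ((((PySem.Int.bitLength (l:Int) - PySem.Int.bitLength (r:Int) : Nat)):Int) + 1).toNat
      = (PySem.Int.bitLength (l:Int) - PySem.Int.bitLength (r:Int)) + 1 := by omega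
  have hmb : l < 2^(PySem.Int.bitLength (r:Int)
      + (PySem.Int.bitLength (l:Int) - PySem.Int.bitLength (r:Int))) := by
    calc l < 2^(PySem.Int.bitLength (l:Int)) := hlhi
      _ ≤ _ := Nat.pow_le_pow_right (by norm_num) (by omega)
  obtain ⟨M1, hM1, hvalA, hbA⟩ :=
    pvDivLoop_spec r hr (PySem.Int.bitLength (l:Int) - PySem.Int.bitLength (r:Int)) l 0 hmb
  have h1lt : 1 < 2^(PySem.Int.bitLength (r:Int)) := by
    calc (1:Nat) < 2^1 := by norm_num
      _ ≤ _ := Nat.pow_le_pow_right (by norm_num) hR1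
  obtain ⟨M2, hM2, hvalB, hbB⟩ := pvAltLoop_spec r hr l 0 1 h1lt (Nat.two_pow_pos _)
  rw [pvGf2mul_base_one, Nat.zero_xor] at hvalB
  have hM12 : M1 = M2 := by
    by_contra hne
    have hx0 : M1 ^^^ M2 ≠ 0 := fun h => hne (by simpa using Nat.xor_eq_zero_iff.mp h)
    obtain ⟨q, hq⟩ := pvIsMul_xor hM1 hM2
    have hq0 : q ≠ 0 := by
      rintro rfl
      rw [pvGf2mul_zero] at hq
      exact hx0 hq
    have hge : 2^(PySem.Int.bitLength (r:Int) - 1) ≤ M1 ^^^ M2 := by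
      rw [hq]
      refine pvGf2mul_ge hrlo ?_ q hq0
      rw [show PySem.Int.bitLength (r:Int) - 1 + 1 = PySem.Int.bitLength (r:Int) from by omega]
      exact hrhi
    have hbB' : l ^^^ M2 < 2^(PySem.Int.bitLength (r:Int) - 1) := by
      rw [← hvalB]; exact hbB
    have hlt2 := Nat.xor_lt_two_pow hbA hbB'
    have he : (l ^^^ M1) ^^^ (l ^^^ M2) = (l ^^^ l) ^^^ (M1 ^^^ M2) := by ac_rfl
    rw [he, Nat.xor_self, Nat.zero_xor] at hlt2
    omega
  unfold printlongdiv printlongdiv_alt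
  rw [halign]
  dsimp only
  rw [hcnt, ← Int.natCast_shiftLeft, hvalA, Int.toNat_natCast, Int.toNat_natCast,
    Nat.one_shiftLeft, hvalB]
  unfold pvBitstring
  rw [hM12]

-- ===== VERDICT (by name: the statement is the Claim_ definition above) =====
theorem printlongdiv_spec : Claim_equal_printlongdiv := by
  intro lhs rhs _hdom hpre
  obtain ⟨hl, hrr⟩ := hpre
  unfold Spec_printlongdiv
  obtain ⟨l, rfl⟩ : ∃ l : Nat, lhs = (l:Int) := ⟨lhs.toNat, (Int.toNat_of_nonneg hl).symm⟩
  obtain ⟨r, rfl⟩ : ∃ r : Nat, rhs = (r:Int) := ⟨rhs.toNat, (Int.toNat_of_nonneg hrr.le).symm⟩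
  exact pv_main l r (by exact_mod_cast hrr)
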